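-- pv_equiv track=rewrite | github.com/Ziyuli1121/RLEPD | training/ppo/pipeline_utils.py | prompt_slice
-- ===== SOURCE A (Python) =====
-- from typing import Any, Dict, Iterable, List, Mapping, Optional, Sequence
--
-- def prompt_slice(prompts: Sequence[str], start: int, size: int) -> List[str]:
--     if size < 0:
--         raise ValueError("size must be non-negative")
--     if size == 0:
--         return []
--     if not prompts:
--         raise ValueError("prompts must not be empty")
--     total = len(prompts)
--     if start >= 0 and start + size <= total:
--         return list(prompts[start : start + size])
--     return [prompts[(start + idx) % total] for idx in range(size)]
-- ===== SOURCE B (Python) =====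
-- from typing import List, Sequence
--
-- def prompt_slice(prompts: Sequence[str], start: int, size: int) -> List[str]:
--     if size < 0:
--         raise ValueError("size must be non-negative")
--     if size == 0:
--         return []
--     if not prompts:
--         raise ValueError("prompts must not be empty")
--     total = len(prompts)
--     out: List[str] = []
--     pos = start % total
--     remaining = size
--     while remaining > 0:
--         chunk = list(prompts[pos : pos + remaining])
--         out.extend(chunk)
--         remaining -= len(chunk)
--         pos = 0
--     return out
-- ===== Notes on version B (the rewrite author's own statement) =====
-- stated objective: alternative
-- what changed: Replaces the per-element modular-indexing comprehension (and its separate contiguous fast-path branch) with a single slice-concatenation loop that block-copies contiguous chunks, starting at start % total and restarting at 0 after each wrap.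
import Mathlib
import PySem

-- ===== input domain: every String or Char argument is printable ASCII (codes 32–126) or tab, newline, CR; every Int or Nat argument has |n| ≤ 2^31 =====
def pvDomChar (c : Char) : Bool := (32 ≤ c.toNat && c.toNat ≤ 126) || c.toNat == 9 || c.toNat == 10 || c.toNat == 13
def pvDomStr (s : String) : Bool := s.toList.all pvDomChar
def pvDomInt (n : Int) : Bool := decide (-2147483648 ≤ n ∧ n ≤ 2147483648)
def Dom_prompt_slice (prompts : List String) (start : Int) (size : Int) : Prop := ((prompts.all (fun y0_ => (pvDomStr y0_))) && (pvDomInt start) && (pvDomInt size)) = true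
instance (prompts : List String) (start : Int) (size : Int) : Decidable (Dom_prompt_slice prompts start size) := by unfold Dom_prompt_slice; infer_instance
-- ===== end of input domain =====

-- B replaces A's per-element modular-indexing comprehension (and its separate contiguous
-- fast-path branch) with one slice-concatenation loop block-copying contiguous chunks
-- (objective: alternative, same cost).

-- ===== PORT A =====
-- Where A raises ValueError (size < 0; size > 0 with empty prompts) the port returns [];
-- those inputs are excluded by Pre_ below.
def prompt_slice (prompts : List String) (start : Int) (size : Int) : List String :=
  if size < 0 then []
  else if size = 0 then []
  else if prompts = [] then []
  else
    let total : Int := prompts.length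
    if 0 ≤ start ∧ start + size ≤ total then
      PySem.List.slice prompts (some start) (some (start + size))
    else
      (PySem.List.pyRange 0 size 1).map
        (fun idx => PySem.List.pyGetD prompts (PySem.Int.mod (start + idx) total) "")

-- ===== PORT B =====
-- the while loop of Source B; fuel = size.toNat bounds the iteration count (each iteration
-- copies at least one element, so at most `size` iterations happen)
def promptSliceLoop (prompts : List String) : Nat → Int → Int → List String → List String
  | 0, _, _, out => out
  | fuel + 1, pos, remaining, out =>
    if remaining > 0 then
      let chunk := PySem.List.slice prompts (some pos) (some (pos + remaining))
      promptSliceLoop prompts fuel 0 (remaining - chunk.length) (out ++ chunk)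
    else out

def prompt_slice_alt (prompts : List String) (start : Int) (size : Int) : List String :=
  if size < 0 then []
  else if size = 0 then []
  else if prompts = [] then []
  else
    let total : Int := prompts.length
    promptSliceLoop prompts size.toNat (PySem.Int.mod start total) size []

-- ===== PRECONDITION & SPEC =====
-- Pre_ excludes exactly the inputs on which A raises ValueError: size < 0, and size > 0 with empty prompts.
def Pre_prompt_slice (prompts : List String) (start : Int) (size : Int) : Prop :=
  0 ≤ size ∧ (size = 0 ∨ prompts ≠ [])
instance (prompts : List String) (start : Int) (size : Int) : Decidable (Pre_prompt_slice prompts start size) := by unfold Pre_prompt_slice; infer_instance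

def pvWitness_prompt_slice : List String × Int × Int := (["a", "b", "c"], -4, 7)

def Spec_prompt_slice (prompts : List String) (start : Int) (size : Int) (out : List String) : Prop := out = prompt_slice_alt prompts start size
instance (prompts : List String) (start : Int) (size : Int) (out : List String) : Decidable (Spec_prompt_slice prompts start size out) := by unfold Spec_prompt_slice; infer_instance

-- ===== CLAIM (what is proved, stated in full; the proofs are below) =====
def Claim_equal_prompt_slice : Prop := ∀ (prompts : List String) (start : Int) (size : Int), Dom_prompt_slice prompts start size → Pre_prompt_slice prompts start size → Spec_prompt_slice prompts start size (prompt_slice prompts start size)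

-- ===== LEMMAS AND PROOFS =====

-- the common canonical value: size elements read with wraparound starting at s
def canon (xs : List String) (s : Int) (r : Nat) : List String :=
  (List.range r).map (fun (k : Nat) => xs.getD ((PySem.Int.mod (s + (k : Int)) (xs.length : Int))).toNat "")

theorem tdm (xs : List String) (a s : Nat) (d : String) (h : a + s ≤ xs.length) :
    (xs.drop a).take s = (List.range s).map (fun k => xs.getD (a+k) d) := by
  apply List.ext_getElem
  · simp; omega
  · intro i h1 h2
    have hi : i < s := by simpa using h2
    have hax : a + i < xs.length := by omega
    simp [List.getElem_take, List.getElem_drop, List.getD_eq_getElem?_getD,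
      List.getElem?_eq_getElem hax]

theorem lemA (prompts : List String) (start size : Int) (hne : prompts ≠ [])
    (hpos : 0 < size) :
    prompt_slice prompts start size = canon prompts start size.toNat := by
  have htot : 0 < (prompts.length : Int) := by
    cases prompts with
    | nil => exact absurd rfl hne
    | cons a l => simp
  unfold prompt_slice canon
  rw [if_neg (by omega), if_neg (by omega), if_neg hne]
  simp only []
  split
  case isTrue h =>
    obtain ⟨h1, h2⟩ := h
    rw [PySem.List.slice_toNat prompts h1 (by omega)]
    have : (start + size).toNat - start.toNat = size.toNat := by omega
    rw [this, tdm prompts start.toNat size.toNat "" (by omega)]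
    apply List.map_congr_left
    intro k hk
    have hk' : (k : Int) < size := by
      have := List.mem_range.mp hk; omega
    have hmod : PySem.Int.mod (start + k) (prompts.length : Int) = start + k := by
      rw [PySem.Int.mod_eq_emod_of_pos htot]
      exact Int.emod_eq_of_lt (by omega) (by omega)
    rw [hmod]
    congr 1
    omega
  case isFalse h =>
    rw [PySem.List.pyRange_one]
    rw [List.map_map]
    simp only [sub_zero]
    apply List.map_congr_left
    intro k hk
    have hk' : (k : Int) < size := by
      have := List.mem_range.mp hk; omega
    simp only [Function.comp, zero_add]
    have h0 : 0 ≤ PySem.Int.mod (start + k) (prompts.length : Int) :=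
      PySem.Int.mod_nonneg _ htot
    have hlt : PySem.Int.mod (start + k) (prompts.length : Int) < (prompts.length : Int) :=
      PySem.Int.mod_lt _ htot
    rw [PySem.List.pyGetD_eq_getElem prompts "" h0 hlt]
    rw [List.getD_eq_getElem _ _ (by omega)]

theorem lemLoop (prompts : List String) (hne : prompts ≠ []) :
    ∀ (fuel : Nat) (pos rem : Int) (out : List String),
    0 ≤ pos → pos < (prompts.length : Int) → rem.toNat ≤ fuel →
    promptSliceLoop prompts fuel pos rem out = out ++ canon prompts pos rem.toNat := by
  have htot : 0 < (prompts.length : Int) := by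
    cases prompts with
    | nil => exact absurd rfl hne
    | cons a l => simp
  intro fuel
  induction fuel with
  | zero =>
    intro pos rem out h0 hlt hfuel
    have hr0 : rem.toNat = 0 := by omega
    simp [promptSliceLoop, canon, hr0]
  | succ f ih =>
    intro pos rem out h0 hlt hfuel
    by_cases hr : rem > 0
    · rw [promptSliceLoop, if_pos hr]
      have hsub : (pos + rem).toNat - pos.toNat = rem.toNat := by omega
      have hslice : PySem.List.slice prompts (some pos) (some (pos + rem))
          = List.take rem.toNat (List.drop pos.toNat prompts) := by
        rw [PySem.List.slice_toNat prompts h0 (by omega), hsub]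
      set p := pos.toNat with hp
      set r := rem.toNat with hrdef
      set n := prompts.length with hn
      have hchunklen : (PySem.List.slice prompts (some pos) (some (pos + rem))).length
          = min r (n - p) := by
        rw [hslice]; simp; omega
      have hc1 : 1 ≤ min r (n - p) := by omega
      set c := (PySem.List.slice prompts (some pos) (some (pos + rem))).length with hcdef
      have hrc : (rem - (c : Int)).toNat = r - c := by omega
      rw [ih 0 (rem - (c : Int)) _ le_rfl htot (by omega), hrc]
      rw [List.append_assoc]
      congr 1
      have hchunk : PySem.List.slice prompts (some pos) (some (pos + rem))
          = (List.range c).map (fun k => prompts.getD (p + k) "") := by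
        rw [hslice, List.take_eq_take_min]
        have : min r (List.drop p prompts).length = c := by
          rw [List.length_drop]; omega
        rw [this, tdm prompts p c "" (by omega)]
      have hcanon : canon prompts pos r
          = (List.range c).map (fun k => prompts.getD (p + k) "")
            ++ canon prompts 0 (r - c) := by
        unfold canon
        have hrsplit : r = c + (r - c) := by omega
        conv_lhs => rw [hrsplit]
        rw [List.range_add, List.map_append, List.map_map]
        congr 1
        · apply List.map_congr_left
          intro k hk
          have hk' : k < c := List.mem_range.mp hk
          have hmod : PySem.Int.mod (pos + (k : Int)) (n : Int) = pos + k := by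
            rw [PySem.Int.mod_eq_emod_of_pos htot]
            exact Int.emod_eq_of_lt (by omega) (by omega)
          rw [hmod]
          congr 1
          omega
        · apply List.map_congr_left
          intro k hk
          have hk' : k < r - c := List.mem_range.mp hk
          have hcnp : c = n - p := by omega
          simp only [Function.comp]
          have hmod : PySem.Int.mod (pos + ((c + k : Nat) : Int)) (n : Int)
              = PySem.Int.mod (0 + (k : Int)) (n : Int) := by
            rw [PySem.Int.mod_eq_emod_of_pos htot, PySem.Int.mod_eq_emod_of_pos htot]
            have : pos + ((c + k : Nat) : Int) = 0 + (k : Int) + (n : Int) * 1 := by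
              push_cast [hcnp]; omega
            rw [this, Int.add_mul_emod_self_left]
          rw [hmod]
      rw [hcanon, hchunk]
    · rw [promptSliceLoop, if_neg hr]
      have hr0 : rem.toNat = 0 := by omega
      simp [canon, hr0]

theorem lemB (prompts : List String) (start size : Int) (hne : prompts ≠ [])
    (hpos : 0 < size) :
    prompt_slice_alt prompts start size = canon prompts start size.toNat := by
  have htot : 0 < (prompts.length : Int) := by
    cases prompts with
    | nil => exact absurd rfl hne
    | cons a l => simp
  unfold prompt_slice_alt
  rw [if_neg (by omega), if_neg (by omega), if_neg hne]
  simp only []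
  rw [lemLoop prompts hne size.toNat (PySem.Int.mod start (prompts.length : Int)) size []
    (PySem.Int.mod_nonneg _ htot) (PySem.Int.mod_lt _ htot) le_rfl]
  rw [List.nil_append]
  unfold canon
  apply List.map_congr_left
  intro k _
  have hmod : PySem.Int.mod (PySem.Int.mod start (prompts.length : Int) + (k : Int))
      (prompts.length : Int) = PySem.Int.mod (start + (k : Int)) (prompts.length : Int) := by
    rw [PySem.Int.mod_eq_emod_of_pos htot, PySem.Int.mod_eq_emod_of_pos htot,
      PySem.Int.mod_eq_emod_of_pos htot]
    exact Int.emod_add_emod start (prompts.length : Int) (k : Int)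
  rw [hmod]

-- ===== VERDICT (by name: the statement is the Claim_ definition above) =====
theorem prompt_slice_spec : Claim_equal_prompt_slice := by
  intro prompts start size _ hpre
  unfold Spec_prompt_slice
  obtain ⟨hsz, hcase⟩ := hpre
  by_cases h0 : size = 0
  · subst h0
    unfold prompt_slice prompt_slice_alt
    simp
  · have hne : prompts ≠ [] := by
      cases hcase with
      | inl h => exact absurd h h0
      | inr h => exact h
    rw [lemA prompts start size hne (by omega), lemB prompts start size hne (by omega)]
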